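-- pv_equiv track=rewrite | github.com/riangone/mailmindhub | core/mail_client.py | is_sender_allowed
-- ===== SOURCE A (Python) =====
-- def is_sender_allowed(sender_email: str, allowed: list) -> bool:
--     if not allowed: return True
--     sender_email = (sender_email or "").strip().lower()
--     if "@" not in sender_email: return False
--     _, _, sender_domain = sender_email.rpartition("@")
--     for entry in allowed:
--         rule = (entry or "").strip().lower()
--         if not rule: continue
--         if "@" in rule and not rule.startswith("@"):
--             if sender_email == rule: return True
--         else:
--             if rule.startswith("@"): rule = rule[1:]
--             if sender_domain == rule: return True
--     return False
-- ===== SOURCE B (Python) =====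
-- def is_sender_allowed(sender_email: str, allowed: list) -> bool:
--     if not allowed:
--         return True
--     sender_email = (sender_email or "").strip().lower()
--     if "@" not in sender_email:
--         return False
--     domain = sender_email.rpartition("@")[2]
--     # Precompute, from the sender alone, the exact set of rule strings that grant access:
--     # "@"+domain and (if non-empty) the bare domain always do; the full address does
--     # unless it starts with "@" (then it is parsed as a domain rule and only matches
--     # when it equals "@"+domain, already covered).
--     targets = {"@" + domain}
--     if domain:
--         targets.add(domain)
--     if not sender_email.startswith("@"):
--         targets.add(sender_email)
--     return any((entry or "").strip().lower() in targets for entry in allowed)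
-- ===== Notes on version B (the rewrite author's own statement) =====
-- stated objective: alternative
-- what changed: B inverts the matching direction: instead of classifying each allowlist rule and comparing it against the sender, it precomputes from the sender alone the exact set of rule strings that grant access ('@'+domain, the bare domain if non-empty, and the full address unless it starts with '@'), then answers with a single any(normalized rule in targets) over the list.
import Mathlib
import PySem

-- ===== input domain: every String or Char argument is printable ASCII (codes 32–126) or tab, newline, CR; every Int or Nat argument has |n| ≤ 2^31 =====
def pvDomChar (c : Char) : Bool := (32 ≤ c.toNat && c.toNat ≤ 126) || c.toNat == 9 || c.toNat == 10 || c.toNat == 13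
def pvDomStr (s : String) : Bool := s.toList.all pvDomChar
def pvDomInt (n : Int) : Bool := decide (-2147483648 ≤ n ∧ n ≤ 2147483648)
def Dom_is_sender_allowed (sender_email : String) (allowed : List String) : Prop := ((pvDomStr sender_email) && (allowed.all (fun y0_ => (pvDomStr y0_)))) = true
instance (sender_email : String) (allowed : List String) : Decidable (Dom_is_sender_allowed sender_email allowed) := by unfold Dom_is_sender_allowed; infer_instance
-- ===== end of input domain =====

-- B inverts the matching direction: it precomputes from the sender the exact set of rule
-- strings that grant access, then does one membership test per allowlist entry (alternative
-- decomposition, same cost).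

-- s.rpartition("@")[2], the part after the LAST '@' — hand port (PySem has no rpartition);
-- exact whenever '@' occurs in cs, the only case the ports use it in.
def pvAfterLastAt (cs : List Char) : List Char := (cs.reverse.takeWhile (· ≠ '@')).reverse

-- ===== PORT A =====
-- A's 'for entry in allowed' loop, with its early returns
def pvALoop (s sdom : List Char) : List String → Bool
  | [] => false
  | entry :: rest =>
    let rule := PySem.Chars.lower (PySem.Chars.strip entry.toList)
    if rule = [] then pvALoop s sdom rest
    else if PySem.Chars.isIn ['@'] rule && !(PySem.Chars.startswith rule ['@']) then
      if s = rule then true else pvALoop s sdom rest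
    else
      let rule' := if PySem.Chars.startswith rule ['@'] then PySem.Chars.slice rule (some 1) none else rule
      if sdom = rule' then true else pvALoop s sdom rest

def is_sender_allowed (sender_email : String) (allowed : List String) : Bool :=
  if allowed = [] then true
  else
    let s := PySem.Chars.lower (PySem.Chars.strip sender_email.toList)
    if !(PySem.Chars.isIn ['@'] s) then false
    else pvALoop s (pvAfterLastAt s) allowed

-- ===== PORT B =====
def is_sender_allowed_alt (sender_email : String) (allowed : List String) : Bool :=
  if allowed = [] then true
  else
    let s := PySem.Chars.lower (PySem.Chars.strip sender_email.toList)
    if !(PySem.Chars.isIn ['@'] s) then false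
    else
      let d := pvAfterLastAt s
      let t0 : PySem.Set (List Char) := PySem.Set.add PySem.Set.empty ('@' :: d)
      let t1 := if d ≠ [] then PySem.Set.add t0 d else t0
      let t2 := if !(PySem.Chars.startswith s ['@']) then PySem.Set.add t1 s else t1
      allowed.any (fun entry => PySem.Set.contains t2 (PySem.Chars.lower (PySem.Chars.strip entry.toList)))

-- ===== PRECONDITION & SPEC =====
def Spec_is_sender_allowed (sender_email : String) (allowed : List String) (out : Bool) : Prop := out = is_sender_allowed_alt sender_email allowed
instance (sender_email : String) (allowed : List String) (out : Bool) : Decidable (Spec_is_sender_allowed sender_email allowed out) := by unfold Spec_is_sender_allowed; infer_instance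

-- ===== CLAIM =====
def Claim_equal_is_sender_allowed : Prop := ∀ (sender_email : String) (allowed : List String), Dom_is_sender_allowed sender_email allowed → Spec_is_sender_allowed sender_email allowed (is_sender_allowed sender_email allowed)

-- ===== LEMMAS AND PROOFS =====

-- the part after the last '@' contains no '@'
theorem pvAfterLastAt_no_at (cs : List Char) : '@' ∉ pvAfterLastAt cs := by
  intro h
  have h2 := List.mem_takeWhile_imp (List.mem_reverse.mp h)
  simp at h2

-- A's decision for one normalized rule
def pvMatchA (s sdom r : List Char) : Bool :=
  if r = [] then false
  else if PySem.Chars.isIn ['@'] r && !(PySem.Chars.startswith r ['@']) then decide (s = r)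
  else decide (sdom = (if PySem.Chars.startswith r ['@'] then PySem.Chars.slice r (some 1) none else r))

theorem pvALoop_eq_any (s sdom : List Char) (l : List String) :
    pvALoop s sdom l = l.any (fun e => pvMatchA s sdom (PySem.Chars.lower (PySem.Chars.strip e.toList))) := by
  induction l with
  | nil => rfl
  | cons e rest ih =>
    have hstep : pvALoop s sdom (e :: rest)
        = (pvMatchA s sdom (PySem.Chars.lower (PySem.Chars.strip e.toList)) || pvALoop s sdom rest) := by
      simp only [pvALoop, pvMatchA]
      split_ifs <;> simp_all [PySem.Chars.slice_eq_listSlice]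
    rw [hstep, ih, List.any_cons]

-- A's per-rule decision, rewritten as membership in B's three-candidate set
theorem pvMatchA_eq_or (s d r : List Char) (hsm : '@' ∈ s) (hdat : '@' ∉ d) :
    pvMatchA s d r
      = (decide (r = '@' :: d)
         || (!decide (d = []) && decide (r = d))
         || (!(PySem.Chars.startswith s ['@']) && decide (r = s))) := by
  have hsne : s ≠ [] := by rintro rfl; simp at hsm
  unfold pvMatchA
  by_cases hre : r = []
  · have h2 : ([] : List Char) ≠ '@' :: d := by simp
    subst hre; simp [h2, hsne.symm]
  · simp only [hre, if_false]
    by_cases hsw : PySem.Chars.startswith r ['@']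
    · -- r starts with '@': A compares d with r[1:]
      obtain ⟨t, rfl⟩ : ∃ t, r = '@' :: t := by
        rcases (PySem.Chars.startswith_iff r ['@']).mp hsw with ⟨u, hu⟩
        exact ⟨u, by simpa using hu.symm⟩
      have hin : PySem.Chars.isIn ['@'] ('@' :: t) = true := by
        rw [PySem.Chars.isIn_iff_infix]; exact ⟨[], t, rfl⟩
      have h3 : ('@' :: t) ≠ d := by intro h; exact hdat (h ▸ (by simp : '@' ∈ '@' :: t))
      simp only [hin, hsw, Bool.not_true, Bool.and_false, Bool.false_eq_true, if_false]
      rw [PySem.Chars.slice_eq_listSlice, PySem.List.slice_from_one]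
      by_cases h5 : ('@' :: t) = s
      · have hss : PySem.Chars.startswith s ['@'] = true := by
          rw [PySem.Chars.startswith_iff]; exact ⟨t, by simpa using h5⟩
        by_cases hdt : d = t
        · subst hdt; simp [hss]
        · simp [h3, hss, hdt, Ne.symm hdt]
      · by_cases hdt : d = t
        · subst hdt; simp
        · simp [h3, h5, hdt, Ne.symm hdt]
    · by_cases hin : PySem.Chars.isIn ['@'] r
      · -- email-form rule: matches iff it equals the full address
        have hrm : '@' ∈ r := by
          rcases (PySem.Chars.isIn_iff_infix ['@'] r).mp hin with ⟨u, v, huv⟩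
          subst huv; simp
        have h2 : r ≠ '@' :: d := by
          rintro rfl; exact hsw (by rw [PySem.Chars.startswith_iff]; exact ⟨d, rfl⟩)
        have h3 : r ≠ d := fun h => hdat (h ▸ hrm)
        simp only [hin, hsw, Bool.not_false, Bool.and_true, if_true]
        by_cases h5 : r = s
        · have hs : PySem.Chars.startswith s ['@'] = false := by
            rw [← h5]; simpa using hsw
          simp [h5, hs]
        · simp [h2, h3, h5, Ne.symm (a := r) (b := s) h5]
      · -- no '@' in the rule: matches iff it equals the bare domain
        have hrm : '@' ∉ r := by
          intro hm
          have : PySem.Chars.isIn ['@'] r = true := by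
            rw [PySem.Chars.isIn_iff_infix]
            rcases List.append_of_mem hm with ⟨u, v, huv⟩
            exact ⟨u, v, by simp [huv]⟩
          simp [this] at hin
        have h2 : r ≠ '@' :: d := by rintro rfl; exact hrm (by simp)
        have h3 : r ≠ s := fun h => hrm (h ▸ hsm)
        have hinf : PySem.Chars.isIn ['@'] r = false := by simpa using hin
        simp only [hinf, Bool.false_and, Bool.false_eq_true, if_false, hsw]
        by_cases h5 : r = d
        · subst h5; simp [h2, h3, hre]
        · simp [h2, h3, h5, Ne.symm (a := r) (b := d) h5]

theorem is_sender_allowed_eq (sender_email : String) (allowed : List String) :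
    is_sender_allowed sender_email allowed = is_sender_allowed_alt sender_email allowed := by
  unfold is_sender_allowed is_sender_allowed_alt
  by_cases h0 : allowed = []
  · simp [h0]
  · simp only [h0, if_false]
    by_cases h1 : PySem.Chars.isIn ['@'] (PySem.Chars.lower (PySem.Chars.strip sender_email.toList))
    · have hsm : '@' ∈ PySem.Chars.lower (PySem.Chars.strip sender_email.toList) := by
        rcases (PySem.Chars.isIn_iff_infix ['@'] _).mp h1 with ⟨u, v, huv⟩
        rw [← huv]; simp
      simp only [h1, Bool.not_true, Bool.false_eq_true, if_false]
      rw [pvALoop_eq_any]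
      have hfun : ∀ e : String,
          pvMatchA (PySem.Chars.lower (PySem.Chars.strip sender_email.toList))
            (pvAfterLastAt (PySem.Chars.lower (PySem.Chars.strip sender_email.toList)))
            (PySem.Chars.lower (PySem.Chars.strip e.toList))
          = PySem.Set.contains
              (let s := PySem.Chars.lower (PySem.Chars.strip sender_email.toList)
               let d := pvAfterLastAt s
               let t0 : PySem.Set (List Char) := PySem.Set.add PySem.Set.empty ('@' :: d)
               let t1 := if d ≠ [] then PySem.Set.add t0 d else t0
               if !(PySem.Chars.startswith s ['@']) then PySem.Set.add t1 s else t1)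
              (PySem.Chars.lower (PySem.Chars.strip e.toList)) := by
        intro e
        rw [pvMatchA_eq_or _ _ _ hsm (pvAfterLastAt_no_at _)]
        by_cases hdne : pvAfterLastAt (PySem.Chars.lower (PySem.Chars.strip sender_email.toList)) = [] <;>
          by_cases hsw : PySem.Chars.startswith (PySem.Chars.lower (PySem.Chars.strip sender_email.toList)) ['@'] <;>
            simp [hdne, hsw, PySem.Set.empty, PySem.Set.contains, Bool.or_comm]
      simp only [hfun]
    · simp [h1]

-- ===== VERDICT =====
theorem is_sender_allowed_spec : Claim_equal_is_sender_allowed := by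
  intro s l _
  exact (is_sender_allowed_eq s l)
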